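-- pv_equiv track=rewrite | github.com/KhoiLe01/CS580Final | problem2.py | remove_dangling_tuple
-- ===== SOURCE A (Python) =====
-- def construct_hashmap_problem2(arr, index):
--     """
--     Docstring for construct_hashmap_problem2
--
--     :param arr: a 2D array
--     :param index: the index to be used as key. Only 0 or 1.
--     :return: a hashmap where the keys are the elements at the given index.
--     """
--     h = {}
--     for i in range(len(arr)):
--         cur_element = arr[i]
--         key = cur_element[index]
--         val = cur_element[1 - index]
--         if key not in h:
--             h[key] = [val]
--         else:
--             h[key].append(val)
--     return h
--
-- def remove_dangling_tuple(db):
--     """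
--     Docstring for remove_dangling_tuple
--
--     :param db: a 3D array. Each element is a 2D array representing a table.
--     """
--     h_bottom_up = {i: construct_hashmap_problem2(db[i], 1) for i in range(len(db))}
--     h_top_down = {i: construct_hashmap_problem2(db[i], 0) for i in range(len(db))}
--
--     # Bottom up pass
--     for i in range(len(db)-2, -1, -1):
--         for j in range(len(db[i])):
--             cur_ai1 = db[i][j][0]
--             cur_ai2 = db[i][j][1]
--             if h_top_down[i+1].get(cur_ai2) is None:
--                 h_bottom_up[i][cur_ai2].remove(cur_ai1)
--                 if len(h_bottom_up[i][cur_ai2]) == 0: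
--                     del h_bottom_up[i][cur_ai2]
--
--     # Top down pass is not necessary because when we obtain the result by going top down,
--     # the dangling tuples would not be included anyway. The top down pass is automatically
--     # handled in get_result function.
--     # for i in range(1, len(db)):
--     #     for j in range(len(db[i])):
--     #         cur_ai1 = db[i][j][0]
--     #         cur_ai2 = db[i][j][1]
--     #         if h_bottom_up[i-1].get(cur_ai1) is None:
--     #             h_top_down[i][cur_ai1].remove(cur_ai2)
--     #             if len(h_top_down[i][cur_ai1]) == 0:
--     #                 del h_top_down[i][cur_ai1]
--
--     return h_bottom_up, h_top_down
-- ===== SOURCE B (Python) =====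
-- def remove_dangling_tuple(db):
--     n = len(db)
--     h_top_down = {}
--     for i in range(n):
--         td = {}
--         for row in db[i]:
--             td.setdefault(row[0], []).append(row[1])
--         h_top_down[i] = td
--     h_bottom_up = {}
--     for i in range(n):
--         h = {}
--         if i == n - 1:
--             for row in db[i]:
--                 h.setdefault(row[1], []).append(row[0])
--         else:
--             nxt = h_top_down[i + 1]
--             for row in db[i]:
--                 if row[1] in nxt:
--                     h.setdefault(row[1], []).append(row[0])
--         h_bottom_up[i] = h
--     return h_bottom_up, h_top_down
-- ===== Notes on version B (the rewrite author's own statement) =====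
-- stated objective: simpler
-- what changed: B builds each bottom_up map in a single filtered forward pass over the table (appending row[0] under row[1] only when row[1] is a key of the next table's top_down map), eliminating A's separate reverse remove/delete pruning pass; top_down is built directly with setdefault.
import Mathlib
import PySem

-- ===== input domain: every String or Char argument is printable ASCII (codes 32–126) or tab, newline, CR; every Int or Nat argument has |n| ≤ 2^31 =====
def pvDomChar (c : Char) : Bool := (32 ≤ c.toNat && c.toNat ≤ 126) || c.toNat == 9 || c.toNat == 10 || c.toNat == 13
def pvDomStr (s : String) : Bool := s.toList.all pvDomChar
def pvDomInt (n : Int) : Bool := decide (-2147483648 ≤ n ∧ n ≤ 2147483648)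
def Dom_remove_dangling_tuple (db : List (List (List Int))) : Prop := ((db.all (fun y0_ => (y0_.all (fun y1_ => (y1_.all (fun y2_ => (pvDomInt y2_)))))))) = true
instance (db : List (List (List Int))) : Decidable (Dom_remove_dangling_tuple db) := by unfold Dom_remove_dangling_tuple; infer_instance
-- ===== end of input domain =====

-- B builds each bottom_up table in ONE filtered forward pass (keep row[0] under row[1] only when
-- row[1] is a key of the next table's top_down map) instead of A's build-then-reverse-prune with
-- list.remove / del; objective: simpler (no speed claim).

-- ===== PORT A =====
-- construct_hashmap_problem2: loop over range(len(arr)); 'h[key].append(val)' on a present key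
-- is Dict.modify (exact); 'h[key] = [val]' on an absent key is Dict.insert.
def pvChmA (arr : List (List Int)) (index : Int) : PySem.Dict Int (List Int) :=
  (PySem.List.pyRange 0 (PySem.List.len arr)).foldl (fun h i =>
    let cur := PySem.List.pyGetD arr i []
    let key := PySem.List.pyGetD cur index 0
    let v := PySem.List.pyGetD cur (1 - index) 0
    if h.contains key = false then h.insert key [v] else h.modify key [] (· ++ [v]))
    PySem.Dict.empty

-- dict accesses h_top_down[i+1], h_bottom_up[i], h_bottom_up[i][a2], db[i], db[i][j], row[0], row[1]
-- are ported with getD/pyGetD defaults: exact on Pre_ (indices/keys are then always present).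
def remove_dangling_tuple (db : List (List (List Int))) : (List (Int × List (Int × List Int))) × (List (Int × List (Int × List Int))) :=
  let n : Int := PySem.List.len db
  let bu0 : PySem.Dict Int (PySem.Dict Int (List Int)) :=
    (PySem.List.pyRange 0 n).foldl (fun d i => d.insert i (pvChmA (PySem.List.pyGetD db i []) 1)) PySem.Dict.empty
  let td : PySem.Dict Int (PySem.Dict Int (List Int)) :=
    (PySem.List.pyRange 0 n).foldl (fun d i => d.insert i (pvChmA (PySem.List.pyGetD db i []) 0)) PySem.Dict.empty
  -- bottom-up pass: for i in range(len(db)-2, -1, -1): for j in range(len(db[i])): …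
  let bu : PySem.Dict Int (PySem.Dict Int (List Int)) :=
    (PySem.List.pyRange (n - 2) (-1) (-1)).foldl (fun bu i =>
      (PySem.List.pyRange 0 (PySem.List.len (PySem.List.pyGetD db i []))).foldl (fun bu j =>
        let row := PySem.List.pyGetD (PySem.List.pyGetD db i []) j []
        let a1 := PySem.List.pyGetD row 0 0
        let a2 := PySem.List.pyGetD row 1 0
        if (td.getD (i + 1) PySem.Dict.empty).get? a2 = none then
          let m := bu.getD i PySem.Dict.empty
          -- h_bottom_up[i][a2].remove(a1): List.remove? (present on Pre_); then 'del' when empty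
          let lst' := (PySem.List.remove? (m.getD a2 []) a1).getD (m.getD a2 [])
          bu.insert i (if lst'.length = 0 then m.erase a2 else m.insert a2 lst')
        else bu) bu) bu0
  (bu.items.map (fun p => (p.1, p.2.items)), td.items.map (fun p => (p.1, p.2.items)))

-- ===== PORT B =====
-- Source B: setdefault(k, []).append(v) is Dict.modify k [] (· ++ [v]) (exact); 'row[1] in nxt' is contains.
def remove_dangling_tuple_alt (db : List (List (List Int))) : (List (Int × List (Int × List Int))) × (List (Int × List (Int × List Int))) :=
  let n : Int := PySem.List.len db
  let td : PySem.Dict Int (PySem.Dict Int (List Int)) :=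
    (PySem.List.pyRange 0 n).foldl (fun d i =>
      d.insert i ((PySem.List.pyGetD db i []).foldl (fun h row =>
        h.modify (PySem.List.pyGetD row 0 0) [] (· ++ [PySem.List.pyGetD row 1 0])) PySem.Dict.empty))
      PySem.Dict.empty
  let bu : PySem.Dict Int (PySem.Dict Int (List Int)) :=
    (PySem.List.pyRange 0 n).foldl (fun d i =>
      let h :=
        if i = n - 1 then
          (PySem.List.pyGetD db i []).foldl (fun h row =>
            h.modify (PySem.List.pyGetD row 1 0) [] (· ++ [PySem.List.pyGetD row 0 0])) PySem.Dict.empty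
        else
          let nxt := td.getD (i + 1) PySem.Dict.empty
          (PySem.List.pyGetD db i []).foldl (fun h row =>
            if nxt.contains (PySem.List.pyGetD row 1 0) then
              h.modify (PySem.List.pyGetD row 1 0) [] (· ++ [PySem.List.pyGetD row 0 0])
            else h) PySem.Dict.empty
      d.insert i h) PySem.Dict.empty
  (bu.items.map (fun p => (p.1, p.2.items)), td.items.map (fun p => (p.1, p.2.items)))

-- ===== PRECONDITION & SPEC =====
-- Pre_ excludes exactly the inputs where Python A raises IndexError: a row with fewer than 2 entries.
def Pre_remove_dangling_tuple (db : List (List (List Int))) : Prop :=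
  ∀ t ∈ db, ∀ r ∈ t, 2 ≤ r.length
instance (db : List (List (List Int))) : Decidable (Pre_remove_dangling_tuple db) := by
  unfold Pre_remove_dangling_tuple; infer_instance
def pvWitness_remove_dangling_tuple : List (List (List Int)) := [[[1, 2], [3, 2]], [[2, 5]]]

def Spec_remove_dangling_tuple (db : List (List (List Int))) (out : (List (Int × List (Int × List Int))) × (List (Int × List (Int × List Int)))) : Prop := out = remove_dangling_tuple_alt db
instance (db : List (List (List Int))) (out : (List (Int × List (Int × List Int))) × (List (Int × List (Int × List Int)))) : Decidable (Spec_remove_dangling_tuple db out) := by unfold Spec_remove_dangling_tuple; infer_instance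

-- ===== CLAIM (what is proved, stated in full; the proofs are below) =====
def Claim_equal_remove_dangling_tuple : Prop := ∀ (db : List (List (List Int))), Dom_remove_dangling_tuple db → Pre_remove_dangling_tuple db → Spec_remove_dangling_tuple db (remove_dangling_tuple db)

-- ===== LEMMAS AND PROOFS =====

-- row key/value as both programs read them
def pvBkey (r : List Int) : Int := PySem.List.pyGetD r 1 0
def pvBval (r : List Int) : Int := PySem.List.pyGetD r 0 0

-- grouped values of key k over rows t (bottom_up orientation)
def pvVals (t : List (List Int)) (k : Int) : List Int :=
  (t.filter (fun r => pvBkey r == k)).map pvBval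

-- per-table builds and A's prune pass, as named forms of the ports' loop bodies
def pvBuild (t : List (List Int)) : PySem.Dict Int (List Int) :=
  t.foldl (fun h r => h.modify (pvBkey r) [] (· ++ [pvBval r])) PySem.Dict.empty

def pvBuildTD (t : List (List Int)) : PySem.Dict Int (List Int) :=
  t.foldl (fun h r => h.modify (pvBval r) [] (· ++ [pvBkey r])) PySem.Dict.empty

def pvPstep (m : PySem.Dict Int (List Int)) (r : List Int) : PySem.Dict Int (List Int) :=
  let lst' := (PySem.List.remove? (m.getD (pvBkey r) []) (pvBval r)).getD (m.getD (pvBkey r) [])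
  if lst'.length = 0 then m.erase (pvBkey r) else m.insert (pvBkey r) lst'

def pvPrune (nxt : PySem.Dict Int (List Int)) (t : List (List Int)) (m : PySem.Dict Int (List Int)) : PySem.Dict Int (List Int) :=
  t.foldl (fun m r => if nxt.get? (pvBkey r) = none then pvPstep m r else m) m

def pvFilt (nxt : PySem.Dict Int (List Int)) (t : List (List Int)) : PySem.Dict Int (List Int) :=
  t.foldl (fun h r => if nxt.contains (pvBkey r) then h.modify (pvBkey r) [] (· ++ [pvBval r]) else h) PySem.Dict.empty

def pvTblF (db : List (List (List Int))) (i : Int) : List (List Int) := PySem.List.pyGetD db i []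

def pvTdA (db : List (List (List Int))) : PySem.Dict Int (PySem.Dict Int (List Int)) :=
  (PySem.List.pyRange 0 (PySem.List.len db)).foldl
    (fun d i => d.insert i (pvChmA (pvTblF db i) 0)) PySem.Dict.empty

def pvTdB (db : List (List (List Int))) : PySem.Dict Int (PySem.Dict Int (List Int)) :=
  (PySem.List.pyRange 0 (PySem.List.len db)).foldl
    (fun d i => d.insert i (pvBuildTD (pvTblF db i))) PySem.Dict.empty

def pvBu0 (db : List (List (List Int))) : PySem.Dict Int (PySem.Dict Int (List Int)) :=
  (PySem.List.pyRange 0 (PySem.List.len db)).foldl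
    (fun d i => d.insert i (pvChmA (pvTblF db i) 1)) PySem.Dict.empty

def pvNxt (td : PySem.Dict Int (PySem.Dict Int (List Int))) (i : Int) : PySem.Dict Int (List Int) :=
  td.getD (i + 1) PySem.Dict.empty

def pvInnerB (td : PySem.Dict Int (PySem.Dict Int (List Int))) (i : Int)
    (bu : PySem.Dict Int (PySem.Dict Int (List Int))) (row : List Int) :
    PySem.Dict Int (PySem.Dict Int (List Int)) :=
  if (pvNxt td i).get? (pvBkey row) = none then
    bu.insert i (pvPstep (bu.getD i PySem.Dict.empty) row)
  else bu

def pvBuA (db : List (List (List Int))) : PySem.Dict Int (PySem.Dict Int (List Int)) :=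
  (PySem.List.pyRange ((PySem.List.len db) - 2) (-1) (-1)).foldl
    (fun bu i => (PySem.List.pyRange 0 (PySem.List.len (pvTblF db i))).foldl
      (fun bu j => pvInnerB (pvTdA db) i bu (PySem.List.pyGetD (pvTblF db i) j [])) bu)
    (pvBu0 db)

def pvBuB (db : List (List (List Int))) : PySem.Dict Int (PySem.Dict Int (List Int)) :=
  (PySem.List.pyRange 0 (PySem.List.len db)).foldl
    (fun d i => d.insert i
      (if i = (PySem.List.len db) - 1 then pvBuild (pvTblF db i)
       else pvFilt (pvNxt (pvTdB db) i) (pvTblF db i))) PySem.Dict.empty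

-- the ports, re-expressed through the named forms (definitional)
theorem portA_eq (db : List (List (List Int))) :
    remove_dangling_tuple db
      = ((pvBuA db).items.map (fun p => (p.1, p.2.items)),
         (pvTdA db).items.map (fun p => (p.1, p.2.items))) := rfl

theorem portB_eq (db : List (List (List Int))) :
    remove_dangling_tuple_alt db
      = ((pvBuB db).items.map (fun p => (p.1, p.2.items)),
         (pvTdB db).items.map (fun p => (p.1, p.2.items))) := rfl

-- A's construct_hashmap_problem2 equals the direct modify-build (branch fusion + range-to-rows)
theorem branch_fuse (h : PySem.Dict Int (List Int)) (k v : Int) :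
    (if h.contains k = false then h.insert k [v] else h.modify k [] (· ++ [v]))
      = h.modify k [] (· ++ [v]) := by
  by_cases hc : h.contains k = true
  · simp [hc]
  · simp only [Bool.not_eq_true] at hc
    simp [hc, PySem.Dict.modify, PySem.Dict.getD_of_not_contains _ _ hc]

theorem pvChmA_zero (arr : List (List Int)) : pvChmA arr 0 = pvBuildTD arr := by
  unfold pvChmA pvBuildTD
  rw [PySem.List.foldl_pyRange_pyGetD arr [] (fun h cur =>
      if h.contains (PySem.List.pyGetD cur 0 0) = false
      then h.insert (PySem.List.pyGetD cur 0 0) [PySem.List.pyGetD cur (1 - 0) 0]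
      else h.modify (PySem.List.pyGetD cur 0 0) [] (· ++ [PySem.List.pyGetD cur (1 - 0) 0]))
      PySem.Dict.empty le_rfl]
  simp only [Int.toNat_zero, List.drop_zero]
  refine PySem.List.foldl_congr_mem _ _ _ _ ?_
  intro acc x _
  simp only [show (1:Int) - 0 = 1 by norm_num]
  exact branch_fuse ..

theorem pvChmA_one (arr : List (List Int)) : pvChmA arr 1 = pvBuild arr := by
  unfold pvChmA pvBuild
  rw [PySem.List.foldl_pyRange_pyGetD arr [] (fun h cur =>
      if h.contains (PySem.List.pyGetD cur 1 0) = false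
      then h.insert (PySem.List.pyGetD cur 1 0) [PySem.List.pyGetD cur (1 - 1) 0]
      else h.modify (PySem.List.pyGetD cur 1 0) [] (· ++ [PySem.List.pyGetD cur (1 - 1) 0]))
      PySem.Dict.empty le_rfl]
  simp only [Int.toNat_zero, List.drop_zero]
  refine PySem.List.foldl_congr_mem _ _ _ _ ?_
  intro acc x _
  simp only [show (1:Int) - 1 = 0 by norm_num]
  exact branch_fuse ..

-- ---- generic Dict facts (erase; self-insertion) ----
theorem find?_filter_ne {v : Type} (l : List (Int × v)) (k k' : Int) (h : k' ≠ k) :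
    List.find? (fun p => p.1 == k') (l.filter (fun p => !(p.1 == k)))
      = List.find? (fun p => p.1 == k') l := by
  induction l with
  | nil => rfl
  | cons a l ih =>
    simp only [List.filter_cons]
    by_cases ha : a.1 = k
    · have h1 : (!(a.1 == k)) = false := by simp [ha]
      have h2 : (a.1 == k') = false := by simp [ha]; exact Ne.symm h
      rw [h1]
      simp only [Bool.false_eq_true, List.find?_cons, h2]
      exact ih
    · have h1 : (!(a.1 == k)) = true := by simp [ha]
      rw [h1]
      simp only [if_pos, List.find?_cons]
      cases hq : (a.1 == k') with
      | true => rfl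
      | false => exact ih

theorem get?_erase {v : Type} (d : PySem.Dict Int v) (k k' : Int) :
    (d.erase k).get? k' = if k' = k then none else d.get? k' := by
  unfold PySem.Dict.erase PySem.Dict.get?
  by_cases h : k' = k
  · subst h
    rw [if_pos rfl]
    rw [List.find?_eq_none.2]
    · rfl
    · intro p hp
      have := (List.mem_filter.1 hp).2
      simp at this ⊢
      exact this
  · simp only [if_neg h]
    rw [find?_filter_ne _ _ _ h]

theorem getD_erase {v : Type} (d : PySem.Dict Int v) (k k' : Int) (d0 : v) :
    (d.erase k).getD k' d0 = if k' = k then d0 else d.getD k' d0 := by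
  unfold PySem.Dict.getD
  rw [get?_erase]
  by_cases h : k' = k <;> simp [h]

theorem contains_erase {v : Type} (d : PySem.Dict Int v) (k k' : Int) :
    (d.erase k).contains k' = if k' = k then false else d.contains k' := by
  rw [PySem.Dict.contains_eq_isSome_get?, get?_erase, PySem.Dict.contains_eq_isSome_get?]
  by_cases h : k' = k <;> simp [h]

theorem nodup_keys_erase {v : Type} (d : PySem.Dict Int v) (k : Int)
    (h : d.keys.Nodup) : (d.erase k).keys.Nodup := by
  unfold PySem.Dict.erase PySem.Dict.keys at *
  exact (List.Sublist.map _ (List.filter_sublist (l := d.items))).nodup h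

theorem insert_getD_self {v : Type} (d : PySem.Dict Int v) (i : Int) (d0 : v)
    (hc : d.contains i = true) (hnd : d.keys.Nodup) :
    d.insert i (d.getD i d0) = d := by
  apply PySem.Dict.ext
  rw [PySem.Dict.items_insert_of_contains _ _ hc]
  have hid : ∀ p ∈ d.items, (if (p.1 == i) = true then (i, d.getD i d0) else p) = p := by
    intro p hp
    by_cases h : p.1 = i
    · have hv : d.getD i d0 = p.2 := by
        have : (i, p.2) ∈ d.items := by rw [← h]; exact hp
        exact PySem.Dict.getD_of_mem_items _ this hnd d0
      subst h
      rw [hv]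
      simp
    · simp [h]
  rw [List.map_congr_left hid]
  simp

-- ---- pyRange facts ----
theorem pyRange_rev (N : Nat) :
    PySem.List.pyRange ((N:Int)-2) (-1) (-1) = (List.range (N-1)).map (fun k : Nat => ((N:Int) - 2 - (k:Int))) := by
  unfold PySem.List.pyRange
  rw [if_neg (by norm_num)]
  rw [if_neg (by norm_num)]
  by_cases h2 : (2:Nat) ≤ N
  · rw [if_pos (by omega)]
    have h3 : ((N:Int) - 2 - -1 + - -1 - 1) / - -1 = ((N:Int) - 1) := by norm_num; try omega
    rw [h3]
    have h4 : ((N:Int) - 1).toNat = N - 1 := by omega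
    rw [h4]
    show List.map (fun k : Nat => (N:Int) - 2 + -1 * (k:Int)) (List.range (N-1))
        = List.map (fun k : Nat => (N:Int) - 2 - (k:Int)) (List.range (N-1))
    exact List.map_congr_left (fun k _ => by push_cast; ring)
  · rw [if_neg (by omega)]
    have h5 : N - 1 = 0 := by omega
    rw [h5]
    rfl

theorem mem_pyRange_rev (N : Nat) (q : Int) :
    q ∈ PySem.List.pyRange ((N:Int)-2) (-1) (-1) ↔ 0 ≤ q ∧ q ≤ (N:Int) - 2 := by
  rw [pyRange_rev, List.mem_map]
  constructor
  · rintro ⟨k, hk, rfl⟩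
    rw [List.mem_range] at hk
    omega
  · rintro ⟨h0, h2⟩
    refine ⟨((N:Int) - 2 - q).toNat, ?_, ?_⟩
    · rw [List.mem_range]; omega
    · omega

theorem nodup_pyRange_rev (N : Nat) :
    (PySem.List.pyRange ((N:Int)-2) (-1) (-1)).Nodup := by
  rw [pyRange_rev]
  exact (List.nodup_range).map (fun a b hab => by omega)

theorem pyRange_fwd (N : Nat) :
    PySem.List.pyRange 0 (N:Int) = (List.range N).map (fun k : Nat => (k:Int)) :=
  PySem.List.pyRange_zero_natCast N

theorem nodup_pyRange_fwd (N : Nat) : (PySem.List.pyRange 0 (N:Int)).Nodup := by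
  rw [pyRange_fwd]
  exact (List.nodup_range).map (fun a b hab => by omega)

theorem mem_pyRange_fwd (N : Nat) (q : Int) :
    q ∈ PySem.List.pyRange 0 (N:Int) ↔ 0 ≤ q ∧ q < (N:Int) := by
  rw [pyRange_fwd, List.mem_map]
  constructor
  · rintro ⟨k, hk, rfl⟩
    rw [List.mem_range] at hk
    omega
  · rintro ⟨h0, h2⟩
    refine ⟨q.toNat, ?_, ?_⟩
    · rw [List.mem_range]; omega
    · omega

-- ---- fresh range-indexed dict builds ----
theorem range_build_items {v : Type} (N : Nat) (V : Int → v) :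
    ((PySem.List.pyRange 0 (N:Int)).foldl (fun d i => d.insert i (V i)) PySem.Dict.empty).items
      = (PySem.List.pyRange 0 (N:Int)).map (fun i => (i, V i)) := by
  rw [PySem.Dict.items_foldl_insert_fresh (PySem.List.pyRange 0 (N:Int)) (fun i => i) V
    PySem.Dict.empty (fun a _ => rfl) (by simpa using nodup_pyRange_fwd N)]
  show ([] : List (Int × v)) ++ _ = _
  simp

theorem range_build_keys {v : Type} (N : Nat) (V : Int → v) :
    ((PySem.List.pyRange 0 (N:Int)).foldl (fun d i => d.insert i (V i)) PySem.Dict.empty).keys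
      = PySem.List.pyRange 0 (N:Int) := by
  unfold PySem.Dict.keys
  rw [range_build_items, List.map_map]
  exact List.map_id _

theorem range_build_getD {v : Type} (N : Nat) (V : Int → v) (q : Int) (d0 : v)
    (hq : q ∈ PySem.List.pyRange 0 (N:Int)) :
    ((PySem.List.pyRange 0 (N:Int)).foldl (fun d i => d.insert i (V i)) PySem.Dict.empty).getD q d0
      = V q := by
  apply PySem.Dict.getD_of_mem_items
  · rw [range_build_items]
    exact List.mem_map.2 ⟨q, hq, rfl⟩
  · rw [range_build_keys]
    exact nodup_pyRange_fwd N

-- ---- the core per-table equivalence ----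
theorem remove?_cons_self (v : Int) (l : List Int) : PySem.List.remove? (v :: l) v = some l := by
  simp only [PySem.List.remove?, List.idxOf?]
  have h0 : List.findIdx? (fun x => x == v) (v :: l) = some 0 := by
    simp [List.findIdx?_cons]
  rw [h0]
  rfl

theorem vals_cons_ne (r : List Int) (rest : List (List Int)) (k : Int) (he : pvBkey r ≠ k) :
    pvVals (r :: rest) k = pvVals rest k := by
  simp only [pvVals, List.filter_cons, beq_iff_eq, if_neg (by simpa using he)]

theorem pvPrune_inv (nxt : PySem.Dict Int (List Int)) :
    forall (rows : List (List Int)) (m : PySem.Dict Int (List Int)),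
    m.keys.Nodup ->
    (forall k, nxt.contains k = false -> m.getD k [] = pvVals rows k) ->
    (forall k, nxt.contains k = false -> m.contains k = true -> pvVals rows k ≠ []) ->
    pvPrune nxt rows m = PySem.Dict.mk (m.items.filter (fun p => nxt.contains p.1)) := by
  intro rows
  induction rows with
  | nil =>
    intro m hnd hbad hcon
    have hall : forall p, p ∈ m.items -> nxt.contains p.1 = true := by
      intro p hp
      by_contra hfalse
      simp only [Bool.not_eq_true] at hfalse
      have hcm : m.contains p.1 = true := by
        rw [PySem.Dict.contains_iff_mem_keys]
        exact PySem.Dict.mem_keys_of_mem_items _ hp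
      exact hcon p.1 hfalse hcm (by simp [pvVals])
    apply PySem.Dict.ext
    simp only [pvPrune, List.foldl_nil]
    rw [List.filter_eq_self.2 hall]
  | cons r rest ih =>
    intro m hnd hbad hcon
    by_cases hg : nxt.contains (pvBkey r) = true
    · have hcond : ¬ (nxt.get? (pvBkey r) = none) := by
        rw [PySem.Dict.get?_eq_none_iff_contains, hg]; simp
      have hstep : pvPrune nxt (r :: rest) m = pvPrune nxt rest m := by
        simp only [pvPrune, List.foldl_cons, if_neg hcond]
      rw [hstep]
      apply ih m hnd
      · intro k hk
        have hne : pvBkey r ≠ k := fun he => by rw [he] at hg; rw [hg] at hk; cases hk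
        rw [← vals_cons_ne r rest k hne]; exact hbad k hk
      · intro k hk hm
        have hne : pvBkey r ≠ k := fun he => by rw [he] at hg; rw [hg] at hk; cases hk
        rw [← vals_cons_ne r rest k hne]; exact hcon k hk hm
    · simp only [Bool.not_eq_true] at hg
      have hcond : nxt.get? (pvBkey r) = none := by
        rw [PySem.Dict.get?_eq_none_iff_contains]; exact hg
      have hv : m.getD (pvBkey r) [] = pvBval r :: pvVals rest (pvBkey r) := by
        rw [hbad _ hg]
        simp [pvVals, List.filter_cons]
      have hrem : (PySem.List.remove? (m.getD (pvBkey r) []) (pvBval r)).getD (m.getD (pvBkey r) [])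
          = pvVals rest (pvBkey r) := by
        rw [hv, remove?_cons_self]; rfl
      have hstep : pvPrune nxt (r :: rest) m = pvPrune nxt rest (pvPstep m r) := by
        simp only [pvPrune, List.foldl_cons, if_pos hcond]
      rw [hstep]
      have hcm : m.contains (pvBkey r) = true := by
        by_contra hcf
        simp only [Bool.not_eq_true] at hcf
        rw [PySem.Dict.getD_of_not_contains _ _ hcf] at hv
        cases hv
      by_cases hemp : pvVals rest (pvBkey r) = []
      · have hps : pvPstep m r = m.erase (pvBkey r) := by
          simp only [pvPstep, hrem, hemp, List.length_nil]
          simp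
        rw [hps]
        rw [ih (m.erase (pvBkey r)) (nodup_keys_erase _ _ hnd) ?hb ?hc]
        case hb =>
          intro k hk
          rw [getD_erase]
          by_cases he : k = pvBkey r
          · rw [if_pos he, he, hemp]
          · rw [if_neg he, ← vals_cons_ne r rest k (fun hx => he hx.symm)]
            exact hbad k hk
        case hc =>
          intro k hk hckk
          rw [contains_erase] at hckk
          by_cases he : k = pvBkey r
          · rw [if_pos he] at hckk; cases hckk
          · rw [if_neg he] at hckk
            rw [← vals_cons_ne r rest k (fun hx => he hx.symm)]
            exact hcon k hk hckk
        · apply PySem.Dict.ext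
          simp only [PySem.Dict.erase]
          rw [List.filter_filter]
          apply List.filter_congr
          intro p hp
          by_cases he : p.1 = pvBkey r
          · rw [he]; simp [hg]
          · simp [he]
      · have hps : pvPstep m r = m.insert (pvBkey r) (pvVals rest (pvBkey r)) := by
          simp only [pvPstep, hrem]
          simp [List.length_eq_zero_iff, hemp]
        rw [hps]
        have hcm' : (m.insert (pvBkey r) (pvVals rest (pvBkey r))).contains (pvBkey r) = true :=
          PySem.Dict.contains_insert_self m _ _
        rw [ih _ (PySem.Dict.nodup_keys_insert m _ _ hnd) ?hb2 ?hc2]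
        case hb2 =>
          intro k hk
          rw [PySem.Dict.getD_insert]
          by_cases he : k = pvBkey r
          · rw [if_pos he, he]
          · rw [if_neg he, ← vals_cons_ne r rest k (fun hx => he hx.symm)]
            exact hbad k hk
        case hc2 =>
          intro k hk hckk
          by_cases he : k = pvBkey r
          · rw [he]; exact hemp
          · rw [PySem.Dict.contains_insert] at hckk
            rw [beq_eq_false_iff_ne.2 he, Bool.false_or] at hckk
            rw [← vals_cons_ne r rest k (fun hx => he hx.symm)]
            exact hcon k hk hckk
        · apply PySem.Dict.ext
          rw [PySem.Dict.items_insert_of_contains _ _ hcm]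
          rw [List.filter_map]
          rw [List.filter_congr (l := m.items)
            (q := fun p => nxt.contains p.1)
            (p := (fun p => nxt.contains p.1) ∘ (fun p => if (p.1 == pvBkey r) = true then (pvBkey r, pvVals rest (pvBkey r)) else p))
            ?hcongr]
          case hcongr =>
            intro p hp
            by_cases he : p.1 = pvBkey r
            · simp [Function.comp, he, hg]
            · simp [Function.comp, he]
          refine (List.map_congr_left ?_).trans (List.map_id _)
          intro p hp
          have hq : nxt.contains p.1 = true := (List.mem_filter.1 hp).2
          have he : p.1 ≠ pvBkey r := by
            intro hx
            rw [hx, hg] at hq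
            cases hq
          simp [he]

theorem pvBuild_getD (t : List (List Int)) (c : Int) : (pvBuild t).getD c [] = pvVals t c := by
  unfold pvBuild pvVals
  rw [show (t.foldl (fun h r => h.modify (pvBkey r) [] (· ++ [pvBval r])) PySem.Dict.empty)
      = ((t.map (fun r => (pvBkey r, pvBval r))).foldl (fun d p => d.modify p.1 [] (· ++ [p.2])) PySem.Dict.empty)
    from List.foldl_map (f := fun r => (pvBkey r, pvBval r))
      (g := fun (d : PySem.Dict Int (List Int)) (p : Int × Int) => d.modify p.1 [] (· ++ [p.2])) |>.symm]
  rw [PySem.Dict.getD_foldl_modify_append]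
  simp [List.filter_map, Function.comp_def, List.map_map]

theorem pvBuild_keys (t : List (List Int)) : (pvBuild t).keys = PySem.Set.ofList (t.map pvBkey) := by
  unfold pvBuild
  rw [PySem.Dict.keys_foldl_modify_key t pvBkey [] (fun _ r => (· ++ [pvBval r]))]
  rfl

theorem pvBuild_nodup (t : List (List Int)) : (pvBuild t).keys.Nodup := by
  unfold pvBuild
  exact PySem.Dict.nodup_keys_foldl_modify_key t pvBkey [] (fun _ r => (· ++ [pvBval r])) _ (by simp)

theorem ofList_filter (p : Int → Bool) (l : List Int) :
    PySem.Set.ofList (l.filter p) = (PySem.Set.ofList l).filter p := by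
  have aux : ∀ (l : List Int) (s : List Int),
      (l.filter p).foldl PySem.Set.add (s.filter p) = (l.foldl PySem.Set.add s).filter p := by
    intro l
    induction l with
    | nil => intro s; rfl
    | cons x xs ih =>
      intro s
      by_cases hp : p x = true
      · have hadd : PySem.Set.add (List.filter p s) x = (PySem.Set.add s x).filter p := by
          unfold PySem.Set.add PySem.Set.contains
          have hc : (List.filter p s).contains x = s.contains x := by simp [hp]
          rw [hc]
          by_cases hs : x ∈ s
          · simp [hs]
          · simp [hs, List.filter_append, hp]
        simp only [List.filter_cons, hp, if_pos, List.foldl_cons, hadd]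
        exact ih _
      · simp only [Bool.not_eq_true] at hp
        have hadd : (PySem.Set.add s x).filter p = List.filter p s := by
          unfold PySem.Set.add PySem.Set.contains
          by_cases hs : x ∈ s
          · simp [hs]
          · simp [hs, List.filter_append, hp]
        simp only [List.filter_cons, hp, Bool.false_eq_true, if_neg, List.foldl_cons]
        rw [← hadd]
        exact ih _
  exact aux l []

theorem pvPrune_eq_filt (nxt : PySem.Dict Int (List Int)) (t : List (List Int)) :
    pvPrune nxt t (pvBuild t) = pvFilt nxt t := by
  have hcon : forall k, nxt.contains k = false -> (pvBuild t).contains k = true -> pvVals t k ≠ [] := by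
    intro k _ hc
    rw [PySem.Dict.contains_iff_mem_keys, pvBuild_keys, PySem.Set.mem_ofList] at hc
    obtain ⟨r, hr, hkr⟩ := List.mem_map.1 hc
    intro hnil
    have : r ∈ t.filter (fun r => pvBkey r == k) := List.mem_filter.2 ⟨hr, by simp [hkr]⟩
    rw [pvVals] at hnil
    rw [List.map_eq_nil_iff.1 hnil] at this
    cases this
  have hmain := pvPrune_inv nxt t (pvBuild t) (pvBuild_nodup t)
    (fun k _ => pvBuild_getD t k) hcon
  rw [hmain]
  have hfilt : pvFilt nxt t = pvBuild (t.filter (fun r => nxt.contains (pvBkey r))) := by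
    unfold pvFilt pvBuild
    exact PySem.List.foldl_if_eq_foldl_filter _ _ _ _
  rw [hfilt]
  apply PySem.Dict.ext
  have hitems : forall (s : List (List Int)),
      (pvBuild s).items = (PySem.Set.ofList (s.map pvBkey)).map (fun k => (k, pvVals s k)) := by
    intro s
    rw [PySem.Dict.items_eq_map_keys (pvBuild s) (pvBuild_nodup s) [], pvBuild_keys]
    exact List.map_congr_left (fun k _ => by rw [pvBuild_getD])
  rw [hitems, hitems]
  rw [show (t.filter (fun r => nxt.contains (pvBkey r))).map pvBkey
        = (t.map pvBkey).filter (fun k => nxt.contains k) from by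
      rw [List.filter_map]; rfl]
  rw [ofList_filter]
  rw [List.filter_map]
  have hq : forall k, ((fun p => nxt.contains p.1) ∘ (fun k => (k, pvVals t k))) k = nxt.contains k := fun _ => rfl
  rw [List.filter_congr (fun k _ => hq k)]
  apply List.map_congr_left
  intro k hk
  have hck : nxt.contains k = true := (List.mem_filter.1 hk).2
  have : pvVals (t.filter (fun r => nxt.contains (pvBkey r))) k = pvVals t k := by
    unfold pvVals
    rw [List.filter_filter]
    congr 1
    apply List.filter_congr
    intro r _
    by_cases hkr : pvBkey r = k
    · simp [hkr, hck]
    · simp [hkr]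
  rw [this]

-- ---- inner loop: the j-indexed prune loop acts only on key i ----
theorem inner_rows (td : PySem.Dict Int (PySem.Dict Int (List Int))) (i : Int) :
    ∀ (rows : List (List Int)) (bu : PySem.Dict Int (PySem.Dict Int (List Int))),
    bu.keys.Nodup → bu.contains i = true →
    rows.foldl (pvInnerB td i) bu
      = bu.insert i (pvPrune (pvNxt td i) rows (bu.getD i PySem.Dict.empty)) := by
  intro rows
  induction rows with
  | nil =>
    intro bu hnd hc
    simp only [List.foldl_nil, pvPrune]
    exact (insert_getD_self bu i PySem.Dict.empty hc hnd).symm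
  | cons r rest ih =>
    intro bu hnd hc
    simp only [List.foldl_cons]
    by_cases hcond : (pvNxt td i).get? (pvBkey r) = none
    · have hstep : pvInnerB td i bu r = bu.insert i (pvPstep (bu.getD i PySem.Dict.empty) r) := by
        simp only [pvInnerB, if_pos hcond]
      rw [hstep, ih _ (PySem.Dict.nodup_keys_insert bu _ _ hnd) (PySem.Dict.contains_insert_self bu i _),
        PySem.Dict.getD_insert_self, PySem.Dict.insert_insert_self]
      congr 1
      simp only [pvPrune, List.foldl_cons, if_pos hcond]
    · have hstep : pvInnerB td i bu r = bu := by
        simp only [pvInnerB, if_neg hcond]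
      rw [hstep, ih _ hnd hc]
      congr 1
      simp only [pvPrune, List.foldl_cons, if_neg hcond]

-- ---- outer reverse pass: keys unchanged, entry q pruned exactly when q is visited ----
theorem outer_fold (db : List (List (List Int))) (td : PySem.Dict Int (PySem.Dict Int (List Int))) :
    ∀ (idxs : List Int) (d : PySem.Dict Int (PySem.Dict Int (List Int))),
    d.keys.Nodup → idxs.Nodup → (∀ i ∈ idxs, d.contains i = true) →
    ((idxs.foldl (fun bu i => (PySem.List.pyRange 0 (PySem.List.len (pvTblF db i))).foldl
        (fun bu j => pvInnerB td i bu (PySem.List.pyGetD (pvTblF db i) j [])) bu) d).keys = d.keys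
     ∧ ∀ q, (idxs.foldl (fun bu i => (PySem.List.pyRange 0 (PySem.List.len (pvTblF db i))).foldl
        (fun bu j => pvInnerB td i bu (PySem.List.pyGetD (pvTblF db i) j [])) bu) d).getD q PySem.Dict.empty
        = if q ∈ idxs then pvPrune (pvNxt td q) (pvTblF db q) (d.getD q PySem.Dict.empty)
          else d.getD q PySem.Dict.empty) := by
  intro idxs
  induction idxs with
  | nil =>
    intro d hnd _ _
    exact ⟨rfl, fun q => by simp⟩
  | cons i rest ih =>
    intro d hnd hidx hcont
    have hci : d.contains i = true := hcont i (List.mem_cons_self)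
    have hstep : (PySem.List.pyRange 0 (PySem.List.len (pvTblF db i))).foldl
        (fun bu j => pvInnerB td i bu (PySem.List.pyGetD (pvTblF db i) j [])) d
        = d.insert i (pvPrune (pvNxt td i) (pvTblF db i) (d.getD i PySem.Dict.empty)) := by
      rw [PySem.List.foldl_pyRange_pyGetD (pvTblF db i) [] (pvInnerB td i) d le_rfl]
      simp only [Int.toNat_zero, List.drop_zero]
      exact inner_rows td i (pvTblF db i) d hnd hci
    have hnd' : (d.insert i (pvPrune (pvNxt td i) (pvTblF db i) (d.getD i PySem.Dict.empty))).keys.Nodup :=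
      PySem.Dict.nodup_keys_insert d _ _ hnd
    have hcont' : ∀ j ∈ rest, (d.insert i (pvPrune (pvNxt td i) (pvTblF db i) (d.getD i PySem.Dict.empty))).contains j = true := by
      intro j hj
      rw [PySem.Dict.contains_insert]
      rw [hcont j (List.mem_cons_of_mem _ hj)]
      simp
    obtain ⟨hk, hg⟩ := ih _ hnd' (List.Nodup.of_cons hidx) hcont'
    simp only [List.foldl_cons, hstep]
    constructor
    · rw [hk, PySem.Dict.keys_insert_of_contains _ _ hci]
    · intro q
      rw [hg q]
      by_cases hqr : q ∈ rest
      · have hqne : q ≠ i := fun he => (List.nodup_cons.1 hidx).1 (he ▸ hqr)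
        rw [if_pos hqr, if_pos (List.mem_cons_of_mem _ hqr)]
        rw [PySem.Dict.getD_insert, if_neg hqne]
      · rw [if_neg hqr]
        rw [PySem.Dict.getD_insert]
        by_cases hqi : q = i
        · rw [if_pos hqi, if_pos (by rw [hqi]; exact List.mem_cons_self), hqi]
        · rw [if_neg hqi, if_neg (by simp [hqi, hqr])]

-- ---- the two top_down maps agree ----
theorem td_eq (db : List (List (List Int))) : pvTdA db = pvTdB db := by
  unfold pvTdA pvTdB
  exact PySem.List.foldl_congr_mem _ _ _ _ (fun acc i _ => by rw [pvChmA_zero])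

-- ---- the two bottom_up maps agree ----
theorem bu_eq (db : List (List (List Int))) : pvBuA db = pvBuB db := by
  have hlen : PySem.List.len db = ((db.length : Nat) : Int) := rfl
  have hbu0keys : (pvBu0 db).keys = PySem.List.pyRange 0 ((db.length : Nat) : Int) := by
    unfold pvBu0
    rw [hlen]
    exact range_build_keys db.length _
  have hbu0nd : (pvBu0 db).keys.Nodup := by
    rw [hbu0keys]; exact nodup_pyRange_fwd db.length
  -- outer pass characterisation of A's bottom_up
  have hrevsub : ∀ i ∈ PySem.List.pyRange (((db.length : Nat) : Int) - 2) (-1) (-1), (pvBu0 db).contains i = true := by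
    intro i hi
    rw [mem_pyRange_rev] at hi
    rw [PySem.Dict.contains_iff_mem_keys, hbu0keys, mem_pyRange_fwd]
    omega
  obtain ⟨hak, hag⟩ := outer_fold db (pvTdA db)
    (PySem.List.pyRange (((db.length : Nat) : Int) - 2) (-1) (-1)) (pvBu0 db)
    hbu0nd (nodup_pyRange_rev db.length) hrevsub
  have hA : pvBuA db = (PySem.List.pyRange (((db.length : Nat) : Int) - 2) (-1) (-1)).foldl
      (fun bu i => (PySem.List.pyRange 0 (PySem.List.len (pvTblF db i))).foldl
        (fun bu j => pvInnerB (pvTdA db) i bu (PySem.List.pyGetD (pvTblF db i) j [])) bu) (pvBu0 db) := by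
    unfold pvBuA
    rw [hlen]
  apply PySem.Dict.ext
  rw [hA]
  rw [PySem.Dict.items_eq_map_keys _ (by rw [hak]; exact hbu0nd) PySem.Dict.empty]
  rw [hak, hbu0keys]
  unfold pvBuB
  rw [hlen, range_build_items]
  apply List.map_congr_left
  intro q hq
  rw [hag q]
  have hq' := (mem_pyRange_fwd db.length q).1 hq
  have hbu0g : (pvBu0 db).getD q PySem.Dict.empty = pvBuild (pvTblF db q) := by
    unfold pvBu0
    rw [hlen, range_build_getD db.length _ q PySem.Dict.empty hq, pvChmA_one]
  by_cases hlast : q = ((db.length : Nat) : Int) - 1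
  · rw [if_neg (by rw [mem_pyRange_rev]; omega), hbu0g, if_pos hlast]
  · rw [if_pos (by rw [mem_pyRange_rev]; omega), hbu0g, if_neg hlast]
    rw [td_eq]
    rw [pvPrune_eq_filt]

-- ===== VERDICT (by name: the statement is the Claim_ definition above) =====
theorem remove_dangling_tuple_spec : Claim_equal_remove_dangling_tuple := by
  intro db _ _
  unfold Spec_remove_dangling_tuple
  rw [portA_eq, portB_eq, td_eq, bu_eq]
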